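-- pv_equiv track=rewrite | github.com/mirzaaa101/AI-Lab-Resource | Hill_Climbing_Search.py | state_generation
-- ===== SOURCE A (Python) =====
-- def calc_cost(my_list):
--     cost = 0
--     for i in range(len(my_list)):
--         for j in range(i + 1, len(my_list)):
--             if my_list[i] > my_list[j]:
--                 cost += 1
--     return cost
--
-- def state_generation(current_state):
--     best_state = current_state.copy()
--     best_cost = calc_cost(current_state)
--     for i in range(len(current_state)):
--         for j in range(i + 1, len(current_state)):
--             new_state1 = current_state.copy()
--             new_state1[i], new_state1[j] = new_state1[j], new_state1[i]  # swapping with the forward elements of the list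
--             new_cost1 = calc_cost(new_state1)
--             if new_cost1 < best_cost:
--                 best_state = new_state1
--                 best_cost = new_cost1
--     return best_state, best_cost
-- ===== SOURCE B (Python) =====
-- def state_generation(current_state):
--     n = len(current_state)
--     base = sum(1 for i in range(n) for j in range(i + 1, n)
--                if current_state[i] > current_state[j])
--     best_i, best_j, best_cost = -1, -1, base
--     for i in range(n):
--         a = current_state[i]
--         for j in range(i + 1, n):
--             b = current_state[j]
--             delta = (b > a) - (a > b)
--             for k in range(i + 1, j):
--                 c = current_state[k]
--                 delta += (b > c) - (a > c) + (c > a) - (c > b)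
--             cand = base + delta
--             if cand < best_cost:
--                 best_i, best_j, best_cost = i, j, cand
--     if best_i < 0:
--         return current_state.copy(), base
--     s = current_state.copy()
--     s[best_i], s[best_j] = s[best_j], s[best_i]
--     return s, best_cost
-- ===== Notes on version B (the rewrite author's own statement) =====
-- stated objective: faster
-- what changed: Instead of fully recomputing the inversion count for every swapped copy (O(n^2) per swap), B computes the base inversion count once and derives each swap's cost by an incremental delta over only the elements strictly between the swapped positions, building the swapped list just once at the end.
import Mathlib
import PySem

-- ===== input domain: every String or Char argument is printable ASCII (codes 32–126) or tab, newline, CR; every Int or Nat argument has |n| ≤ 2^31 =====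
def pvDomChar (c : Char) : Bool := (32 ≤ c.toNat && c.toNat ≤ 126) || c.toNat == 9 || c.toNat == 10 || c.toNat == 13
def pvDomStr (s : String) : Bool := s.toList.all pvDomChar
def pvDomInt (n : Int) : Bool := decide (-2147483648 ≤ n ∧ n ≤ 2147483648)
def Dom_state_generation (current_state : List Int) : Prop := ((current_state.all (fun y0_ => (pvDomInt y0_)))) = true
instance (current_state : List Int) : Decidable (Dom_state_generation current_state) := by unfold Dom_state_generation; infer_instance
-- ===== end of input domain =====

-- B replaces A's full O(n^2) inversion recount per candidate swap by an O(n) incremental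
-- delta over the elements strictly between the swapped positions (objective: faster).

-- ===== PORT A =====
def calc_cost (my_list : List Int) : Int :=
  (PySem.List.pyRange 0 (my_list.length : Int) 1).foldl (fun cost i =>
    (PySem.List.pyRange (i + 1) (my_list.length : Int) 1).foldl (fun cost j =>
      if PySem.List.pyGetD my_list i 0 > PySem.List.pyGetD my_list j 0 then cost + 1 else cost)
      cost) 0

def state_generation (current_state : List Int) : List Int × Int :=
  let n : Int := current_state.length
  let init : List Int × Int := (current_state, calc_cost current_state)
  (PySem.List.pyRange 0 n 1).foldl (fun (st : List Int × Int) i =>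
    (PySem.List.pyRange (i + 1) n 1).foldl (fun (st : List Int × Int) j =>
      let new_state1 :=
        PySem.List.pySetD
          (PySem.List.pySetD current_state i (PySem.List.pyGetD current_state j 0)) j
          (PySem.List.pyGetD current_state i 0)
      let new_cost1 := calc_cost new_state1
      if new_cost1 < st.2 then (new_state1, new_cost1) else st) st) init

-- ===== PORT B =====
def state_generation_alt (current_state : List Int) : List Int × Int :=
  let n : Int := current_state.length
  let base : Int :=
    (((PySem.List.pyRange 0 n 1).flatMap (fun i =>
        (PySem.List.pyRange (i + 1) n 1).filter (fun j =>
          decide (PySem.List.pyGetD current_state i 0 > PySem.List.pyGetD current_state j 0)))).length : Int)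
  let st : Int × Int × Int :=
    (PySem.List.pyRange 0 n 1).foldl (fun (st : Int × Int × Int) i =>
      let a := PySem.List.pyGetD current_state i 0
      (PySem.List.pyRange (i + 1) n 1).foldl (fun (st : Int × Int × Int) j =>
        let b := PySem.List.pyGetD current_state j 0
        let delta : Int := (if b > a then 1 else 0) - (if a > b then 1 else 0)
        let delta :=
          (PySem.List.pyRange (i + 1) j 1).foldl (fun (delta : Int) k =>
            let c := PySem.List.pyGetD current_state k 0
            delta + ((if b > c then 1 else 0) - (if a > c then 1 else 0)
              + (if c > a then 1 else 0) - (if c > b then 1 else 0))) delta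
        let cand := base + delta
        if cand < st.2.2 then (i, j, cand) else st) st) (-1, -1, base)
  if st.1 < 0 then (current_state, base)
  else
    (PySem.List.pySetD
      (PySem.List.pySetD current_state st.1 (PySem.List.pyGetD current_state st.2.1 0)) st.2.1
      (PySem.List.pyGetD current_state st.1 0), st.2.2)

-- ===== PRECONDITION & SPEC =====
def Spec_state_generation (current_state : List Int) (out : List Int × Int) : Prop := out = state_generation_alt current_state
instance (current_state : List Int) (out : List Int × Int) : Decidable (Spec_state_generation current_state out) := by unfold Spec_state_generation; infer_instance

-- ===== CLAIM (what is proved, stated in full; the proofs are below) =====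
def Claim_equal_state_generation : Prop := ∀ (current_state : List Int), Dom_state_generation current_state → Spec_state_generation current_state (state_generation current_state)

-- ===== LEMMAS AND PROOFS =====

-- `if a > b then 1 else 0`, the contribution of one ordered pair to the inversion count
def cgt (a b : Int) : Int := if a > b then 1 else 0

-- abstract inversion count of the first `n` values of `g`
def invF (g : ℕ → ℤ) (n : ℕ) : ℤ :=
  ∑ i ∈ Finset.range n, ∑ j ∈ Finset.Ico (i + 1) n, cgt (g i) (g j)

def swapF (g : ℕ → ℤ) (p q : ℕ) : ℕ → ℤ :=
  fun k => if k = p then g q else if k = q then g p else g k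

def dF (g : ℕ → ℤ) (p q i j : ℕ) : ℤ :=
  cgt (swapF g p q i) (swapF g p q j) - cgt (g i) (g j)

lemma sum_eq_pair (f : ℕ → ℤ) (s : Finset ℕ) (a b : ℕ) (ha : a ∈ s) (hb : b ∈ s) (hab : a ≠ b)
    (h : ∀ c ∈ s, c ≠ a → c ≠ b → f c = 0) : ∑ i ∈ s, f i = f a + f b := by
  rw [← Finset.add_sum_erase s f ha]
  congr 1
  apply Finset.sum_eq_single_of_mem b (Finset.mem_erase.mpr ⟨hab.symm, hb⟩)
  intro c hc hcb
  obtain ⟨hca, hcs⟩ := Finset.mem_erase.mp hc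
  exact h c hcs hca hcb

lemma dF_zero (g : ℕ → ℤ) (p q i j : ℕ) (hip : i ≠ p) (hiq : i ≠ q) (hjp : j ≠ p) (hjq : j ≠ q) :
    dF g p q i j = 0 := by
  simp only [dF, swapF]
  split_ifs <;> first | omega | ring

-- the incremental-delta identity: swapping positions p < q < n changes the inversion
-- count by a term for the pair (p,q) plus one term per position strictly between them
theorem invF_swap (g : ℕ → ℤ) (p q n : ℕ) (hpq : p < q) (hqn : q < n) :
    invF (swapF g p q) n = invF g n +
      (cgt (g q) (g p) - cgt (g p) (g q)
        + ∑ k ∈ Finset.Ico (p + 1) q,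
            (cgt (g q) (g k) - cgt (g p) (g k) + cgt (g k) (g p) - cgt (g k) (g q))) := by
  have hpn : p < n := lt_trans hpq hqn
  set D : ℕ → ℤ := fun i => ∑ j ∈ Finset.Ico (i + 1) n, dF g p q i j with hDdef
  have key : invF (swapF g p q) n - invF g n = ∑ i ∈ Finset.range n, D i := by
    unfold invF
    rw [← Finset.sum_sub_distrib]
    refine Finset.sum_congr rfl fun i _ => ?_
    rw [hDdef]
    simp only [dF]
    rw [Finset.sum_sub_distrib]
  have hD_low : ∀ i, i < p → D i = 0 := by
    intro i hi
    have : D i = dF g p q i p + dF g p q i q := by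
      apply sum_eq_pair
      · exact Finset.mem_Ico.mpr ⟨by omega, hpn⟩
      · exact Finset.mem_Ico.mpr ⟨by omega, hqn⟩
      · omega
      · intro c hc hcp hcq
        exact dF_zero g p q i c (by omega) (by omega) hcp hcq
    rw [this]
    simp only [dF, swapF]
    split_ifs <;> first | omega | ring
  have hD_mid : ∀ i, p < i → i < q → D i = dF g p q i q := by
    intro i hpi hiq
    apply Finset.sum_eq_single_of_mem q (Finset.mem_Ico.mpr ⟨by omega, hqn⟩)
    intro c hc hcq
    have hc' := Finset.mem_Ico.mp hc
    exact dF_zero g p q i c (by omega) (by omega) (by omega) hcq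
  have hD_high : ∀ i, q < i → D i = 0 := by
    intro i hi
    apply Finset.sum_eq_zero
    intro c hc
    have hc' := Finset.mem_Ico.mp hc
    exact dF_zero g p q i c (by omega) (by omega) (by omega) (by omega)
  have hD_p : D p = (∑ k ∈ Finset.Ico (p + 1) q, dF g p q p k) + dF g p q p q
      + ∑ j ∈ Finset.Ico (q + 1) n, dF g p q p j := by
    rw [hDdef]
    have h1 : ∑ j ∈ Finset.Ico (p + 1) n, dF g p q p j
        = ∑ j ∈ Finset.Ico (p + 1) q, dF g p q p j + ∑ j ∈ Finset.Ico q n, dF g p q p j :=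
      (Finset.sum_Ico_consecutive _ (by omega) (by omega)).symm
    have h2 : ∑ j ∈ Finset.Ico q n, dF g p q p j
        = ∑ j ∈ Finset.Ico q (q + 1), dF g p q p j + ∑ j ∈ Finset.Ico (q + 1) n, dF g p q p j :=
      (Finset.sum_Ico_consecutive _ (by omega) (by omega)).symm
    have h3 : ∑ j ∈ Finset.Ico q (q + 1), dF g p q p j = dF g p q p q := by
      simp
    simp only [h1, h2, h3]
    ring
  have hD_q : D q = ∑ j ∈ Finset.Ico (q + 1) n, dF g p q q j := rfl
  have hsplit : ∑ i ∈ Finset.range n, D i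
      = ∑ i ∈ Finset.Ico 0 p, D i + D p + ∑ i ∈ Finset.Ico (p + 1) q, D i + D q
        + ∑ i ∈ Finset.Ico (q + 1) n, D i := by
    rw [Finset.range_eq_Ico]
    rw [← Finset.sum_Ico_consecutive D (Nat.zero_le p) (by omega : p ≤ n)]
    rw [← Finset.sum_Ico_consecutive D (by omega : p ≤ p + 1) (by omega : p + 1 ≤ n)]
    rw [← Finset.sum_Ico_consecutive D (by omega : p + 1 ≤ q) (by omega : q ≤ n)]
    rw [← Finset.sum_Ico_consecutive D (by omega : q ≤ q + 1) (by omega : q + 1 ≤ n)]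
    have hp1 : ∑ i ∈ Finset.Ico p (p + 1), D i = D p := by simp
    have hq1 : ∑ i ∈ Finset.Ico q (q + 1), D i = D q := by simp
    rw [hp1, hq1]
    ring
  have hlow0 : ∑ i ∈ Finset.Ico 0 p, D i = 0 :=
    Finset.sum_eq_zero fun i hi => hD_low i (Finset.mem_Ico.mp hi).2
  have hhigh0 : ∑ i ∈ Finset.Ico (q + 1) n, D i = 0 :=
    Finset.sum_eq_zero fun i hi => hD_high i (by exact (Finset.mem_Ico.mp hi).1)
  have hmid : ∑ i ∈ Finset.Ico (p + 1) q, D i = ∑ i ∈ Finset.Ico (p + 1) q, dF g p q i q :=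
    Finset.sum_congr rfl fun i hi => by
      have hi' := Finset.mem_Ico.mp hi
      exact hD_mid i (by omega) hi'.2
  have hcancel : ∑ j ∈ Finset.Ico (q + 1) n, dF g p q p j
      + ∑ j ∈ Finset.Ico (q + 1) n, dF g p q q j = 0 := by
    rw [← Finset.sum_add_distrib]
    apply Finset.sum_eq_zero
    intro j hj
    have hj' := Finset.mem_Ico.mp hj
    simp only [dF, swapF]
    split_ifs <;> first | omega | ring
  have hinner : ∑ k ∈ Finset.Ico (p + 1) q, dF g p q p k
      + ∑ i ∈ Finset.Ico (p + 1) q, dF g p q i q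
      = ∑ k ∈ Finset.Ico (p + 1) q,
          (cgt (g q) (g k) - cgt (g p) (g k) + cgt (g k) (g p) - cgt (g k) (g q)) := by
    rw [← Finset.sum_add_distrib]
    refine Finset.sum_congr rfl fun k hk => ?_
    have hk' := Finset.mem_Ico.mp hk
    simp only [dF, swapF]
    split_ifs <;> first | omega | ring
  have hdpq : dF g p q p q = cgt (g q) (g p) - cgt (g p) (g q) := by
    simp only [dF, swapF]
    split_ifs <;> first | omega | ring
  have htot := key
  rw [hsplit, hlow0, hhigh0, hmid, hD_p, hD_q, hdpq] at htot
  linarith [hcancel, hinner, htot]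

lemma invF_congr (g h : ℕ → ℤ) (n : ℕ) (H : ∀ k, k < n → g k = h k) : invF g n = invF h n := by
  unfold invF
  refine Finset.sum_congr rfl fun i hi => Finset.sum_congr rfl fun j hj => ?_
  have hi' := Finset.mem_range.mp hi
  have hj' := Finset.mem_Ico.mp hj
  rw [H i hi', H j hj'.2]

lemma sum_map_pyRange_nat (a b : ℕ) (f : ℤ → ℤ) :
    ((PySem.List.pyRange (a : Int) (b : Int) 1).map f).sum = ∑ j ∈ Finset.Ico a b, f (j : Int) := by
  induction b with
  | zero => simp [PySem.List.pyRange_one_eq_nil]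
  | succ b ih =>
    by_cases hab : a ≤ b
    · have hc : ((b : ℤ) + 1) = ((b + 1 : ℕ) : ℤ) := by push_cast; ring
      rw [← hc, PySem.List.pyRange_one_succ_right (by exact_mod_cast hab)]
      rw [List.map_append, List.sum_append, ih, Finset.sum_Ico_succ_top hab]
      simp
    · rw [PySem.List.pyRange_one_eq_nil (by exact_mod_cast (by omega : (b + 1 : ℤ) ≤ a))]
      rw [Finset.Ico_eq_empty (by omega)]
      simp

lemma foldl_add_pyRange_nat (a b : ℕ) (f : ℤ → ℤ) (c : ℤ) :
    (PySem.List.pyRange (a : Int) (b : Int) 1).foldl (fun acc j => acc + f j) c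
      = c + ∑ j ∈ Finset.Ico a b, f (j : Int) := by
  rw [PySem.List.foldl_add, sum_map_pyRange_nat]

lemma inner_loop_eq (x : List Int) (p : ℕ) (c : ℤ) :
    (PySem.List.pyRange ((p : ℤ) + 1) (x.length : ℤ) 1).foldl
      (fun cost j => if PySem.List.pyGetD x (p : ℤ) 0 > PySem.List.pyGetD x j 0 then cost + 1
        else cost) c
    = c + ∑ j ∈ Finset.Ico (p + 1) x.length, cgt (x.getD p 0) (x.getD j 0) := by
  rw [PySem.List.foldl_congr_mem
      (f := fun cost j =>
        if PySem.List.pyGetD x (p : ℤ) 0 > PySem.List.pyGetD x j 0 then cost + 1 else cost)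
      (g := fun cost j => cost + cgt (PySem.List.pyGetD x (p : ℤ) 0) (PySem.List.pyGetD x j 0))
      _ _ (by intro acc j _; simp only [cgt]; split_ifs <;> ring)]
  have he : ((p : ℤ) + 1) = ((p + 1 : ℕ) : ℤ) := by push_cast; ring
  rw [he, foldl_add_pyRange_nat]
  simp [cgt]

-- A's calc_cost is the abstract inversion count
lemma calc_cost_eq (x : List Int) : calc_cost x = invF (fun k => x.getD k 0) x.length := by
  unfold calc_cost
  rw [PySem.List.foldl_congr_mem
      (g := fun (cost : ℤ) (i : ℤ) => cost
        + ∑ j ∈ Finset.Ico (i.toNat + 1) x.length, cgt (x.getD i.toNat 0) (x.getD j 0))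
      _ _ _ ?hcg]
  case hcg =>
    intro acc i hi
    obtain ⟨h0, hn⟩ := PySem.List.mem_pyRange_one.mp hi
    obtain ⟨p, rfl⟩ : ∃ p : ℕ, i = (p : ℤ) := ⟨i.toNat, (Int.toNat_of_nonneg h0).symm⟩
    simpa using inner_loop_eq x p acc
  rw [show (0 : ℤ) = ((0 : ℕ) : ℤ) by simp]
  rw [foldl_add_pyRange_nat]
  unfold invF
  rw [Finset.range_eq_Ico]
  simp

-- B's inline base count equals A's calc_cost
lemma base_eq (x : List Int) :
    (((PySem.List.pyRange 0 (x.length : Int) 1).flatMap (fun i =>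
        (PySem.List.pyRange (i + 1) (x.length : Int) 1).filter (fun j =>
          decide (PySem.List.pyGetD x i 0 > PySem.List.pyGetD x j 0)))).length : Int)
      = calc_cost x := by
  rw [List.length_flatMap, Nat.cast_list_sum, List.map_map, calc_cost_eq]
  rw [show (0 : ℤ) = ((0 : ℕ) : ℤ) by simp]
  rw [List.map_congr_left (g := fun i => ∑ j ∈ Finset.Ico (i.toNat + 1) x.length,
        cgt (x.getD i.toNat 0) (x.getD j 0)) ?hmc]
  case hmc =>
    intro i hi
    obtain ⟨h0, hn⟩ := PySem.List.mem_pyRange_one.mp hi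
    obtain ⟨p, rfl⟩ : ∃ p : ℕ, i = (p : ℤ) := ⟨i.toNat, (Int.toNat_of_nonneg h0).symm⟩
    simp only [Function.comp]
    rw [← List.countP_eq_length_filter, ← PySem.List.sum_map_ite_one_zero]
    have he : ((p : ℤ) + 1) = ((p + 1 : ℕ) : ℤ) := by push_cast; ring
    rw [he, sum_map_pyRange_nat]
    simp [cgt]
  rw [sum_map_pyRange_nat (f := fun i => ∑ j ∈ Finset.Ico (i.toNat + 1) x.length,
        cgt (x.getD i.toNat 0) (x.getD j 0))]
  unfold invF
  rw [Finset.range_eq_Ico]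
  simp

-- the cost of the swapped copy that A recomputes equals base + B's incremental delta
lemma cand_eq (x : List Int) (i j : Int) (h0 : 0 ≤ i) (hij : i < j) (hj : j < (x.length : Int)) :
    calc_cost (PySem.List.pySetD
        (PySem.List.pySetD x i (PySem.List.pyGetD x j 0)) j (PySem.List.pyGetD x i 0))
      = calc_cost x +
        (PySem.List.pyRange (i + 1) j 1).foldl (fun (delta : Int) k =>
            delta + ((if PySem.List.pyGetD x j 0 > PySem.List.pyGetD x k 0 then 1 else 0)
              - (if PySem.List.pyGetD x i 0 > PySem.List.pyGetD x k 0 then 1 else 0)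
              + (if PySem.List.pyGetD x k 0 > PySem.List.pyGetD x i 0 then 1 else 0)
              - (if PySem.List.pyGetD x k 0 > PySem.List.pyGetD x j 0 then 1 else 0)))
          ((if PySem.List.pyGetD x j 0 > PySem.List.pyGetD x i 0 then 1 else 0)
            - (if PySem.List.pyGetD x i 0 > PySem.List.pyGetD x j 0 then 1 else 0)) := by
  obtain ⟨p, rfl⟩ : ∃ p : ℕ, i = (p : ℤ) := ⟨i.toNat, (Int.toNat_of_nonneg h0).symm⟩
  obtain ⟨q, rfl⟩ : ∃ q : ℕ, j = (q : ℤ) := ⟨j.toNat, (Int.toNat_of_nonneg (by omega)).symm⟩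
  have hpq : p < q := by exact_mod_cast hij
  have hq : q < x.length := by exact_mod_cast hj
  have hp : p < x.length := lt_trans hpq hq
  simp only [PySem.List.pyGetD_natCast, PySem.List.pySetD_natCast]
  have hagree : ∀ k, k < x.length →
      ((x.set p (x.getD q 0)).set q (x.getD p 0)).getD k 0
        = swapF (fun k => x.getD k 0) p q k := by
    intro k hk
    simp only [List.getD, List.getElem?_set, List.length_set, swapF]
    split_ifs <;> (try omega) <;> (try simp)
  have hlen : ((x.set p (x.getD q 0)).set q (x.getD p 0)).length = x.length := by simp
  rw [calc_cost_eq, hlen, invF_congr _ (swapF (fun k => x.getD k 0) p q) x.length hagree,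
    invF_swap (fun k => x.getD k 0) p q x.length hpq hq, ← calc_cost_eq]
  congr 1
  rw [PySem.List.foldl_congr_mem
      (g := fun (delta : ℤ) k => delta + (cgt (x.getD q 0) (PySem.List.pyGetD x k 0)
        - cgt (x.getD p 0) (PySem.List.pyGetD x k 0)
        + cgt (PySem.List.pyGetD x k 0) (x.getD p 0)
        - cgt (PySem.List.pyGetD x k 0) (x.getD q 0)))
      _ _ _ ?hcg2]
  case hcg2 =>
    intro acc k _
    simp only [cgt]
  have he : ((p : ℤ) + 1) = ((p + 1 : ℕ) : ℤ) := by push_cast; ring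
  rw [he, foldl_add_pyRange_nat]
  simp [cgt]

lemma foldl_rel {α σ τ : Type} (l : List α) (f : σ → α → σ) (g : τ → α → τ) (R : σ → τ → Prop)
    (s0 : σ) (t0 : τ) (h0 : R s0 t0) (h : ∀ s t a, a ∈ l → R s t → R (f s a) (g t a)) :
    R (l.foldl f s0) (l.foldl g t0) := by
  induction l generalizing s0 t0 with
  | nil => exact h0
  | cons a l ih =>
    exact ih (f s0 a) (g t0 a) (h s0 t0 a (List.mem_cons_self) h0)
      (fun s t b hb => h s t b (List.mem_cons_of_mem a hb))

-- reconstruction of A's running best_state from B's running (best_i, best_j, best_cost)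
def pvRecon (x : List Int) (t : Int × Int × Int) : List Int :=
  if t.1 < 0 then x
  else PySem.List.pySetD (PySem.List.pySetD x t.1 (PySem.List.pyGetD x t.2.1 0)) t.2.1
    (PySem.List.pyGetD x t.1 0)

-- the relation the two selection loops preserve
def pvR (x : List Int) (s : List Int × Int) (t : Int × Int × Int) : Prop :=
  s.2 = t.2.2 ∧ s.1 = pvRecon x t ∧ (t.1 < 0 → t = (-1, -1, calc_cost x))

lemma pvR_if (x : List Int) (s : List Int × Int) (t : Int × Int × Int) (i j c : Int)
    (hR : pvR x s t) (hi0 : 0 ≤ i) :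
    pvR x
      (if c < t.2.2 then
        (PySem.List.pySetD (PySem.List.pySetD x i (PySem.List.pyGetD x j 0)) j
          (PySem.List.pyGetD x i 0), c)
      else s)
      (if c < t.2.2 then (i, j, c) else t) := by
  split_ifs with h
  · refine ⟨rfl, ?_, fun habs => absurd habs (by simp at habs ⊢; omega)⟩
    have hni : ¬ ((i, j, c).1 < 0) := by simp; omega
    simp only [pvRecon, if_neg hni]
  · exact hR

lemma loop_invariant (x : List Int) :
    pvR x
      (List.foldl
        (fun (st : List Int × Int) i =>
          List.foldl
            (fun (st : List Int × Int) j =>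
              if calc_cost (PySem.List.pySetD (PySem.List.pySetD x i (PySem.List.pyGetD x j 0)) j (PySem.List.pyGetD x i 0)) < st.2 then
                (PySem.List.pySetD (PySem.List.pySetD x i (PySem.List.pyGetD x j 0)) j (PySem.List.pyGetD x i 0), calc_cost (PySem.List.pySetD (PySem.List.pySetD x i (PySem.List.pyGetD x j 0)) j (PySem.List.pyGetD x i 0)))
              else st)
            st (PySem.List.pyRange (i + 1) (x.length : Int) 1))
        (x, calc_cost x) (PySem.List.pyRange 0 (x.length : Int) 1))
      (List.foldl
        (fun (st : Int × Int × Int) i =>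
          List.foldl
            (fun (st : Int × Int × Int) j =>
              if calc_cost x + List.foldl (fun (delta : Int) k =>
                  delta + ((((if PySem.List.pyGetD x j 0 > PySem.List.pyGetD x k 0 then 1 else 0)
                    - if PySem.List.pyGetD x i 0 > PySem.List.pyGetD x k 0 then 1 else 0)
                    + if PySem.List.pyGetD x k 0 > PySem.List.pyGetD x i 0 then 1 else 0)
                    - if PySem.List.pyGetD x k 0 > PySem.List.pyGetD x j 0 then 1 else 0))
                ((if PySem.List.pyGetD x j 0 > PySem.List.pyGetD x i 0 then 1 else 0)
                  - if PySem.List.pyGetD x i 0 > PySem.List.pyGetD x j 0 then 1 else 0)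
                (PySem.List.pyRange (i + 1) j 1) < st.2.2 then
                (i, j, calc_cost x + List.foldl (fun (delta : Int) k =>
                  delta + ((((if PySem.List.pyGetD x j 0 > PySem.List.pyGetD x k 0 then 1 else 0)
                    - if PySem.List.pyGetD x i 0 > PySem.List.pyGetD x k 0 then 1 else 0)
                    + if PySem.List.pyGetD x k 0 > PySem.List.pyGetD x i 0 then 1 else 0)
                    - if PySem.List.pyGetD x k 0 > PySem.List.pyGetD x j 0 then 1 else 0))
                ((if PySem.List.pyGetD x j 0 > PySem.List.pyGetD x i 0 then 1 else 0)
                  - if PySem.List.pyGetD x i 0 > PySem.List.pyGetD x j 0 then 1 else 0)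
                (PySem.List.pyRange (i + 1) j 1))
              else st)
            st (PySem.List.pyRange (i + 1) (x.length : Int) 1))
        (-1, -1, calc_cost x) (PySem.List.pyRange 0 (x.length : Int) 1)) := by
  apply foldl_rel
  · exact ⟨rfl, by simp [pvRecon], fun _ => rfl⟩
  · intro s t i hi hR
    obtain ⟨hi0, hin⟩ := PySem.List.mem_pyRange_one.mp hi
    apply foldl_rel
    · exact hR
    · intro s t j hj hR'
      obtain ⟨hj1, hjn⟩ := PySem.List.mem_pyRange_one.mp hj
      have hc := cand_eq x i j hi0 (by omega) hjn
      obtain ⟨h1, h2, h3⟩ := hR'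
      rw [hc, h1]
      exact pvR_if x s t i j _ ⟨h1, h2, h3⟩ hi0
-- ===== VERDICT (by name: the statement is the Claim_ definition above) =====
theorem state_generation_spec : Claim_equal_state_generation := by
  intro x _
  unfold Spec_state_generation
  simp only [state_generation, state_generation_alt]
  rw [base_eq x]
  obtain ⟨h1, h2, h3⟩ := loop_invariant x
  split_ifs with hneg
  · have ht := h3 hneg
    refine Prod.ext ?_ ?_
    · rw [h2]
      simp [pvRecon, hneg]
    · rw [h1, ht]
  · refine Prod.ext ?_ ?_
    · rw [h2]
      simp only [pvRecon]
      rw [if_neg hneg]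
    · rw [h1]
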